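-- pv_equiv track=rewrite | github.com/cipher982/ai_sql_plotter | utils.py | detect_malicious_sql_query
-- ===== SOURCE A (Python) =====
-- def detect_malicious_sql_query(query: str) -> bool:
--     """
--     Detects if a SQL query is malicious by checking if it contains any of the following keywords:
--     - DROP
--     - TRUNCATE
--     - DELETE
--     - ALTER
--     - CREATE
--     - GRANT
--     - REVOKE
--     - RENAME
--     - UPDATE
--     - INSERT
--
--     Args:
--         query: A string containing the SQL query to check.
--
--     Returns:
--         A boolean indicating if the query is malicious.
--     """
--     malicious_keywords = [
--         "DROP",
--         "TRUNCATE",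
--         "DELETE",
--         "ALTER",
--         "CREATE",
--         "GRANT",
--         "REVOKE",
--         "RENAME",
--         "UPDATE",
--         "INSERT",
--     ]
--
--     for keyword in malicious_keywords:
--         if keyword in query.upper():
--             return True
--
--     return False
-- ===== SOURCE B (Python) =====
-- def detect_malicious_sql_query(query: str) -> bool:
--     keywords = ("DROP", "TRUNCATE", "DELETE", "ALTER", "CREATE",
--                 "GRANT", "REVOKE", "RENAME", "UPDATE", "INSERT")
--     q = query.upper()
--     return any(q.startswith(k, i) for i in range(len(q)) for k in keywords)
-- ===== Notes on version B (the rewrite author's own statement) =====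
-- stated objective: alternative
-- what changed: Replaces A's keyword-major loop (ten separate substring scans of the uppercased query) by a position-major single pass that checks at each position of the uppercased query whether any keyword starts there, via str.startswith with a start offset.
import Mathlib
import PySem

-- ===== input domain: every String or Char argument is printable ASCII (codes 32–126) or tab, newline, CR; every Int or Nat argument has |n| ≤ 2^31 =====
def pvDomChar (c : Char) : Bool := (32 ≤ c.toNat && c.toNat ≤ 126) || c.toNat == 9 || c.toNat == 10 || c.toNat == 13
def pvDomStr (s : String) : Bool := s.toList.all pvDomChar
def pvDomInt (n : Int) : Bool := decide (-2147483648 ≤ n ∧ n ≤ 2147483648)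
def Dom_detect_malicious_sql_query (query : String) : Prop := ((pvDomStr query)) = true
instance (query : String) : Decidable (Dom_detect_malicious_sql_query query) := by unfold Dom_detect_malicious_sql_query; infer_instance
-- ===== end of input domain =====

-- B replaces A's keyword-major loop (ten independent substring scans of the uppercased
-- query) by a position-major single pass: one scan over the positions of the uppercased
-- query, checking at each position whether any keyword starts there (objective: alternative).


-- ===== PORT A =====
-- A's keyword list
def maliciousKeywordsA : List (List Char) :=
  ["DROP".toList, "TRUNCATE".toList, "DELETE".toList, "ALTER".toList, "CREATE".toList,
   "GRANT".toList, "REVOKE".toList, "RENAME".toList, "UPDATE".toList, "INSERT".toList]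

-- A's for-loop with early return: 'if keyword in query.upper(): return True'
def detectLoopA : List (List Char) → String → Bool
  | [], _ => false
  | k :: rest, query =>
      if PySem.Chars.isIn k (PySem.Chars.upper query.toList) then true
      else detectLoopA rest query

def detect_malicious_sql_query (query : String) : Bool :=
  detectLoopA maliciousKeywordsA query

-- ===== PORT B =====
-- B's keyword tuple
def keywordsB : List (List Char) :=
  ["DROP".toList, "TRUNCATE".toList, "DELETE".toList, "ALTER".toList, "CREATE".toList,
   "GRANT".toList, "REVOKE".toList, "RENAME".toList, "UPDATE".toList, "INSERT".toList]

-- any(q.startswith(k, i) for i in range(len(q)) for k in keywords);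
-- q.startswith(k, i) with 0 ≤ i ≤ len(q) is exactly: k is a prefix of q dropped at i
def detect_malicious_sql_query_alt (query : String) : Bool :=
  let q := PySem.Chars.upper query.toList
  (List.range q.length).any fun i =>
    keywordsB.any fun k => PySem.Chars.startswith (q.drop i) k

-- ===== PRECONDITION & SPEC =====
def Spec_detect_malicious_sql_query (query : String) (out : Bool) : Prop := out = detect_malicious_sql_query_alt query
instance (query : String) (out : Bool) : Decidable (Spec_detect_malicious_sql_query query out) := by unfold Spec_detect_malicious_sql_query; infer_instance

-- ===== CLAIM (what is proved, stated in full; the proofs are below) =====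
def Claim_equal_detect_malicious_sql_query : Prop := ∀ (query : String), Dom_detect_malicious_sql_query query → Spec_detect_malicious_sql_query query (detect_malicious_sql_query query)

-- ===== LEMMAS AND PROOFS =====

-- A's early-return loop is an 'any' over the keyword list
theorem detectLoopA_eq_any (kws : List (List Char)) (query : String) :
    detectLoopA kws query
      = kws.any (fun k => PySem.Chars.isIn k (PySem.Chars.upper query.toList)) := by
  induction kws with
  | nil => rfl
  | cons k rest ih =>
      simp [detectLoopA, ih]

-- a nonempty pattern is an infix iff it is a prefix at some position i < length
theorem infix_iff_prefix_drop (k u : List Char) (hk : k ≠ []) :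
    k <:+: u ↔ ∃ i < u.length, k <+: u.drop i := by
  constructor
  · rintro ⟨s, t, rfl⟩
    refine ⟨s.length, ?_, ?_⟩
    · have := List.length_pos_iff.mpr hk
      simp; omega
    · simp [List.drop_left' (by rfl)]
  · rintro ⟨i, hi, hp⟩
    exact hp.isInfix.trans (List.drop_suffix i u).isInfix

-- ===== VERDICT (by name: the statement is the Claim_ definition above) =====
theorem detect_malicious_sql_query_spec : Claim_equal_detect_malicious_sql_query := by
  intro query _
  unfold Spec_detect_malicious_sql_query detect_malicious_sql_query detect_malicious_sql_query_alt
  rw [detectLoopA_eq_any]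
  have hne : ∀ k ∈ keywordsB, k ≠ [] := by decide
  have hkw : maliciousKeywordsA = keywordsB := rfl
  rw [hkw]
  set u := PySem.Chars.upper query.toList with hu
  rw [Bool.eq_iff_iff]
  simp only [List.any_eq_true, List.mem_range, PySem.Chars.isIn_iff_infix,
    PySem.Chars.startswith_iff]
  constructor
  · rintro ⟨k, hk, h⟩
    obtain ⟨i, hi, hp⟩ := (infix_iff_prefix_drop k u (hne k hk)).mp h
    exact ⟨i, hi, k, hk, hp⟩
  · rintro ⟨i, hi, k, hk, hp⟩
    exact ⟨k, hk, (infix_iff_prefix_drop k u (hne k hk)).mpr ⟨i, hi, hp⟩⟩
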